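-- pv_equiv track=rewrite | github.com/jchung05/google_code_jam | 2017/qualifications/bathroom_stalls/bathroom_stalls.py | which
-- ===== SOURCE A (Python) =====
-- def which(N, K):
--     s = [N]
--     while K:
--         if s[0] > 0:
--             tmp = s[0] - 1
--         else:
--             tmp = s[0]
--         if tmp % 2 == 0:
--             s.append(tmp // 2)
--             s.append(tmp // 2)
--         else:
--             s.append(tmp // 2 + 1)
--             s.append(tmp // 2)
--         K -= 1
--         if K is not 0:
--             s.sort(reverse=True)
--             s = s[1:]
--     return (max(s[-2:]), min(s[-2:]))
-- ===== SOURCE B (Python) =====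
-- def which(N, K):
--     # Level-by-level cohort splitting: the histogram maps segment length -> how many
--     # such segments exist; all c maximal segments are consumed in ONE step (people
--     # K..K-c+1), so the loop runs O(log K) times instead of once per person.
--     cnt = {N: 1}
--     while K:
--         L = max(cnt)
--         c = cnt.pop(L)
--         tmp = L - 1 if L > 0 else L
--         hi = tmp - tmp // 2
--         lo = tmp // 2
--         if K <= c:
--             return (hi, lo)
--         K -= c
--         cnt[hi] = cnt.get(hi, 0) + c
--         cnt[lo] = cnt.get(lo, 0) + c
--     return (N, N)
-- ===== Notes on version B (the rewrite author's own statement) =====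
-- stated objective: faster
-- what changed: A simulates one person at a time (K iterations, each re-sorting a growing list); B keeps a histogram of segment length -> multiplicity and consumes ALL c maximal segments in a single cohort step (K <= c answers immediately, else K -= c and both child lengths gain c), so the loop runs once per distinct length level, not once per person.
-- outside the precondition, e.g. on which(-1, 2): A returns (0, -1), B returns (0, 0); on which(5, -1): A does not finish within the time limit, B returns (2, 2)
import Mathlib
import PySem

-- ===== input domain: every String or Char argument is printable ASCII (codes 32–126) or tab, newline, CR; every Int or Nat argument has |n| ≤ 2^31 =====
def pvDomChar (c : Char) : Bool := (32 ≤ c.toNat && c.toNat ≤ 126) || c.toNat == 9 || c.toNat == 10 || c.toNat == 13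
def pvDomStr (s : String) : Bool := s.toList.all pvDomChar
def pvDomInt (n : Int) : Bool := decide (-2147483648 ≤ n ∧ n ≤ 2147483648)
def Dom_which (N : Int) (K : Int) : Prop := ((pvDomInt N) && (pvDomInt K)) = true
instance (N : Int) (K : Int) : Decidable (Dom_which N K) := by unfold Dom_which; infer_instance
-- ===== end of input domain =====

-- B replaces A's one-person-at-a-time simulation (append children, re-sort the growing list,
-- drop the head, K times) by cohort splitting on a length→multiplicity histogram: all c maximal
-- segments are consumed in one step (K ≤ c answers, else K -= c); objective: faster.

-- ===== PORT A =====
-- A's while-loop; the Int counter K is represented by the fuel (K iterations for K ≥ 0;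
-- for K < 0 the Python loop never terminates — excluded by Pre_which).
def whichLoop (fuel : Nat) (s : List Int) : List Int :=
  match fuel with
  | 0 => s
  | m + 1 =>
    let x := (PySem.List.pyGet? s 0).getD 0   -- s[0]; s is never empty here (starts at [N], grows)
    let tmp := if x > 0 then x - 1 else x
    let s' :=
      if PySem.Int.mod tmp 2 == 0 then
        s ++ [PySem.Int.floordiv tmp 2, PySem.Int.floordiv tmp 2]
      else
        s ++ [PySem.Int.floordiv tmp 2 + 1, PySem.Int.floordiv tmp 2]
    if m == 0 then s'   -- K just became 0: no sort, loop exits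
    else whichLoop m (PySem.List.slice (PySem.List.sorted s' (fun v => v) true) (some 1) none)

def which (N : Int) (K : Int) : Int × Int :=
  let s := whichLoop K.toNat [N]
  let last2 := PySem.List.slice s (some (-2)) none      -- s[-2:], never empty
  ((PySem.List.max? last2 (fun v => v)).getD 0, (PySem.List.min? last2 (fun v => v)).getD 0)

-- ===== PORT B =====
-- B's while-loop. fuel is only a termination measure (K decreases by c ≥ 1 per iteration,
-- so fuel = K.toNat suffices and the fuel-0 / K == 0 exits coincide with Python's while exit).
def bLoop (N : Int) (fuel : Nat) (K : Int) (cnt : PySem.Dict Int Int) : Int × Int :=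
  match fuel with
  | 0 => (N, N)                                   -- while-exit (K = 0 here)
  | f + 1 =>
    if K == 0 then (N, N)                         -- while-exit
    else
      let L := (PySem.List.max? cnt.keys (fun v => v)).getD 0   -- L = max(cnt)
      let c := (cnt.get? L).getD 0                              -- c = cnt.pop(L) …
      let cnt0 := cnt.erase L                                   -- … (removal half of pop)
      let tmp := if L > 0 then L - 1 else L
      let hi := tmp - PySem.Int.floordiv tmp 2
      let lo := PySem.Int.floordiv tmp 2
      if K ≤ c then (hi, lo)
      else
        let cnt1 := cnt0.insert hi (cnt0.getD hi 0 + c)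
        let cnt2 := cnt1.insert lo (cnt1.getD lo 0 + c)
        bLoop N f (K - c) cnt2

def which_alt (N : Int) (K : Int) : Int × Int :=
  bLoop N K.toNat K (PySem.Dict.empty.insert N 1)   -- {N: 1}

-- ===== PRECONDITION & SPEC =====
-- Pre_ excludes K < 0, on which A's while-loop never terminates, and N < 0 (a negative number
-- of stalls, outside the task's natural domain), on which A's value is an artefact of its
-- remove-the-maximum-after-appending step and B does the natural splitting instead.
def Pre_which (N : Int) (K : Int) : Prop := 0 ≤ N ∧ 0 ≤ K
instance (N : Int) (K : Int) : Decidable (Pre_which N K) := by unfold Pre_which; infer_instance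

def pvWitness_which : Int × Int := (8, 3)

def Spec_which (N : Int) (K : Int) (out : Int × Int) : Prop := out = which_alt N K
instance (N : Int) (K : Int) (out : Int × Int) : Decidable (Spec_which N K out) := by unfold Spec_which; infer_instance

-- ===== CLAIM (what is proved, stated in full; the proofs are below) =====
def Claim_equal_which : Prop := ∀ (N : Int) (K : Int), Dom_which N K → Pre_which N K → Spec_which N K (which N K)

-- ===== LEMMAS AND PROOFS =====

-- named pieces shared by the proof-side definitions
def maxKey (cnt : PySem.Dict Int Int) : Int := (PySem.List.max? cnt.keys (fun v => v)).getD 0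
def tmpOf (L : Int) : Int := if L > 0 then L - 1 else L
def hiOf (L : Int) : Int := tmpOf L - PySem.Int.floordiv (tmpOf L) 2
def loOf (L : Int) : Int := PySem.Int.floordiv (tmpOf L) 2

-- proof-side intermediate program: A's loop re-expressed per person on the histogram
-- (one maximal segment is split per unit of fuel)
def pNext (cnt : PySem.Dict Int Int) : PySem.Dict Int Int :=
  let L := maxKey cnt
  let c := (cnt.get? L).getD 0
  let cnt1 := if c == 1 then cnt.erase L else cnt.insert L (c - 1)
  let cnt2 := cnt1.insert (hiOf L) (cnt1.getD (hiOf L) 0 + 1)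
  cnt2.insert (loOf L) (cnt2.getD (loOf L) 0 + 1)

def pLoop (N : Int) (fuel : Nat) (cnt : PySem.Dict Int Int) : Int × Int :=
  match fuel with
  | 0 => (N, N)
  | m + 1 =>
    if m == 0 then (hiOf (maxKey cnt), loOf (maxKey cnt))
    else pLoop N m (pNext cnt)

-- the final expression A computes from its list
def answerOf (s : List Int) : Int × Int :=
  let last2 := PySem.List.slice s (some (-2)) none
  ((PySem.List.max? last2 (fun v => v)).getD 0, (PySem.List.min? last2 (fun v => v)).getD 0)

-- the invariant tying A's sorted list to the histogram
def StInv (s : List Int) (cnt : PySem.Dict Int Int) : Prop :=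
  s ≠ [] ∧ s.Pairwise (fun p q => q ≤ p) ∧ (∀ y ∈ s, 0 ≤ y) ∧
  (∀ v : Int, cnt.getD v 0 = (s.count v : Int)) ∧
  cnt.keys.Nodup ∧ (∀ k : Int, k ∈ cnt.keys ↔ k ∈ s)

-- histogram invariant for the second (histogram ↔ cohort) layer
def DInv (d : PySem.Dict Int Int) : Prop :=
  d.keys ≠ [] ∧ d.keys.Nodup ∧ (∀ v : Int, v ∈ d.keys ↔ d.getD v 0 ≠ 0) ∧
  (∀ v : Int, 0 ≤ d.getD v 0) ∧ (∀ v ∈ d.keys, 0 ≤ v)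

theorem find?_filter_ne (l : List (Int × Int)) (k v : Int) (h : v ≠ k) :
    (l.filter (fun p => !(p.1 == k))).find? (fun p => p.1 == v) = l.find? (fun p => p.1 == v) := by
  induction l with
  | nil => rfl
  | cons a l ih =>
    by_cases ha : a.1 = k
    · simp [List.filter_cons, ha, List.find?_cons, Ne.symm h, ih]
    · by_cases hv : a.1 = v
      · simp [List.filter_cons, ha, List.find?_cons, hv, h]
      · simp [List.filter_cons, ha, List.find?_cons, hv, ih]

theorem get?_erase_self (d : PySem.Dict Int Int) (k : Int) : (d.erase k).get? k = none := by
  have : (d.items.filter (fun p => !(p.1 == k))).find? (fun p => p.1 == k) = none := by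
    rw [List.find?_eq_none]
    intro p hp
    have := (List.mem_filter.mp hp).2
    simpa using this
  simp [PySem.Dict.erase, PySem.Dict.get?, this]

theorem get?_erase_ne (d : PySem.Dict Int Int) (k v : Int) (h : v ≠ k) :
    (d.erase k).get? v = d.get? v := by
  simp [PySem.Dict.erase, PySem.Dict.get?, find?_filter_ne d.items k v h]

theorem getD_erase (d : PySem.Dict Int Int) (k v : Int) :
    (d.erase k).getD v 0 = if v = k then 0 else d.getD v 0 := by
  split_ifs with h
  · rw [PySem.Dict.getD_eq_get?_getD, h, get?_erase_self]; rfl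
  · rw [PySem.Dict.getD_eq_get?_getD, get?_erase_ne _ _ _ h, ← PySem.Dict.getD_eq_get?_getD]

theorem mem_keys_erase (d : PySem.Dict Int Int) (k v : Int) :
    v ∈ (d.erase k).keys ↔ v ≠ k ∧ v ∈ d.keys := by
  simp only [PySem.Dict.keys, PySem.Dict.erase, List.mem_map, List.mem_filter]
  constructor
  · rintro ⟨p, ⟨hp, hne⟩, rfl⟩
    exact ⟨by simpa using hne, ⟨p, hp, rfl⟩⟩
  · rintro ⟨hne, ⟨p, hp, rfl⟩⟩
    exact ⟨p, ⟨hp, by simpa using hne⟩, rfl⟩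

theorem nodup_keys_erase (d : PySem.Dict Int Int) (k : Int) (h : d.keys.Nodup) :
    (d.erase k).keys.Nodup := by
  have hs : ((d.items.filter (fun p => !(p.1 == k))).map (fun p => p.1)).Sublist
      (d.items.map (fun p => p.1)) := List.Sublist.map _ List.filter_sublist
  exact List.Nodup.sublist hs h

theorem pairwise_head_max {a : Int} {t : List Int}
    (h : (a :: t).Pairwise (fun p q => q ≤ p)) : ∀ y ∈ a :: t, y ≤ a := by
  intro y hy
  rcases List.mem_cons.mp hy with rfl | hy
  · exact le_refl _
  · exact (List.pairwise_cons.mp h).1 y hy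

theorem maxKey_eq_of (cnt : PySem.Dict Int Int) (a : Int)
    (ha : a ∈ cnt.keys) (hmax : ∀ k ∈ cnt.keys, k ≤ a) : maxKey cnt = a := by
  unfold maxKey
  cases hm : PySem.List.max? cnt.keys (fun v => v) with
  | none =>
    exact absurd ((PySem.List.max?_eq_none_iff _ _).mp hm ▸ ha) (List.not_mem_nil)
  | some m =>
    have hm_mem : m ∈ cnt.keys := PySem.List.max?_mem hm
    have h1 : m ≤ a := hmax m hm_mem
    have h2 : a ≤ m := PySem.List.max?_isMax hm a ha
    simp [le_antisymm h1 h2]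

theorem maxKeys_eq (cnt : PySem.Dict Int Int) (a : Int) (t : List Int)
    (hmem : ∀ k : Int, k ∈ cnt.keys ↔ k ∈ a :: t)
    (hpw : (a :: t).Pairwise (fun p q => q ≤ p)) :
    maxKey cnt = a :=
  maxKey_eq_of cnt a ((hmem a).mpr List.mem_cons_self)
    (fun k hk => pairwise_head_max hpw k ((hmem k).mp hk))

-- floor-division/remainder by 2 in ediv/emod form, for omega
theorem fdiv2_facts (tmp : Int) :
    PySem.Int.floordiv tmp 2 = tmp / 2 ∧ PySem.Int.mod tmp 2 = tmp % 2 := by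
  constructor
  · simp [PySem.Int.floordiv, Int.fdiv_eq_ediv]
  · simp [PySem.Int.mod, Int.fmod_eq_emod]

theorem hiLo_facts (L : Int) (h : 0 ≤ L) :
    0 ≤ loOf L ∧ loOf L ≤ hiOf L ∧ hiOf L ≤ L ∧ (1 ≤ L → hiOf L < L) ∧ (L = 0 → hiOf L = 0 ∧ loOf L = 0) := by
  have hq := (fdiv2_facts (tmpOf L)).1
  have htmp : (0 ≤ tmpOf L ∧ tmpOf L ≤ L) ∧ (1 ≤ L → tmpOf L = L - 1) ∧ (L = 0 → tmpOf L = 0) := by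
    unfold tmpOf; split_ifs <;> omega
  unfold hiOf loOf
  rw [hq]
  omega

-- named pieces of A's loop body (proof-side only; the step equations below are rfl)
def aTmp (s : List Int) : Int :=
  let x := (PySem.List.pyGet? s 0).getD 0
  if x > 0 then x - 1 else x

def aNextList (s : List Int) : List Int :=
  if PySem.Int.mod (aTmp s) 2 == 0 then
    s ++ [PySem.Int.floordiv (aTmp s) 2, PySem.Int.floordiv (aTmp s) 2]
  else
    s ++ [PySem.Int.floordiv (aTmp s) 2 + 1, PySem.Int.floordiv (aTmp s) 2]

theorem whichLoop_succ (m : Nat) (s : List Int) :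
    whichLoop (m + 2) s =
      whichLoop (m + 1)
        (PySem.List.slice (PySem.List.sorted (aNextList s) (fun v => v) true) (some 1) none) := rfl

theorem pLoop_succ (N : Int) (m : Nat) (cnt : PySem.Dict Int Int) :
    pLoop N (m + 2) cnt = pLoop N (m + 1) (pNext cnt) := rfl

-- hiOf/loOf name A's appended children (for a nonnegative head a)
theorem aNextList_eq (a : Int) (t : List Int) (ha : 0 ≤ a) :
    aNextList (a :: t) = (a :: t) ++ [hiOf a, loOf a] := by
  have hx : (PySem.List.pyGet? (a :: t) 0).getD 0 = a := by
    simp [PySem.List.pyGet?, PySem.List.pyIdx?]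
  have haT : aTmp (a :: t) = tmpOf a := by
    rw [aTmp, tmpOf]; simp only [hx]
  have hq := (fdiv2_facts (tmpOf a)).1
  have hm := (fdiv2_facts (tmpOf a)).2
  rw [aNextList, haT, hiOf, loOf]
  simp only [hm, beq_iff_eq]
  split_ifs with h <;>
    (refine congrArg (fun z => (a :: t) ++ z) ?_; simp only [List.cons.injEq, and_true, hq]; omega)

-- one A-step preserves the invariant, with A's next list named explicitly
theorem step_inv (a : Int) (t : List Int) (cnt : PySem.Dict Int Int)
    (hSt : StInv (a :: t) cnt)
    (hL : maxKey cnt = a) :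
    StInv ((PySem.List.sorted (aNextList (a :: t)) (fun v => v) true).tail) (pNext cnt) := by
  obtain ⟨hne, hpw, hpos, hcount, hnodup, hkeys⟩ := hSt
  have ha : 0 ≤ a := hpos a List.mem_cons_self
  obtain ⟨hlo0, hlohi, hhia, hhilt, hzero⟩ := hiLo_facts a ha
  obtain ⟨lo, hlo⟩ : ∃ x, loOf a = x := ⟨_, rfl⟩
  obtain ⟨hi, hhi⟩ : ∃ x, hiOf a = x := ⟨_, rfl⟩
  simp only [hlo, hhi] at hlo0 hlohi hhia hhilt hzero
  have hanl : aNextList (a :: t) = (a :: t) ++ [hi, lo] := by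
    rw [aNextList_eq a t ha, hhi, hlo]
  rw [hanl]
  -- the sorted successor list
  obtain ⟨σ, hσ⟩ : ∃ x, PySem.List.sorted ((a :: t) ++ [hi, lo]) (fun v => v) true = x := ⟨_, rfl⟩
  rw [hσ]
  have hperm : σ.Perm ((a :: t) ++ [hi, lo]) := by rw [← hσ]; exact PySem.List.sorted_perm _ _ _
  have hσpw : σ.Pairwise (fun p q => q ≤ p) := by
    rw [← hσ]; exact PySem.List.sorted_pairwise_rev _ _
  have hσne : σ ≠ [] := by rw [← hσ, Ne, PySem.List.sorted_eq_nil_iff]; simp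
  obtain ⟨h0, tt, hσeq⟩ := List.exists_cons_of_ne_nil hσne
  have hmax : ∀ y ∈ (a :: t) ++ [hi, lo], y ≤ a := by
    intro y hy
    rcases List.mem_append.mp hy with hy | hy
    · exact pairwise_head_max hpw y hy
    · simp only [List.mem_cons, List.not_mem_nil, or_false] at hy
      rcases hy with rfl | rfl <;> omega
  have hh : h0 = a := by
    have h1 : a ≤ h0 := PySem.List.key_head_sorted_rev_ge _ _ (hσ ▸ hσeq) a (by simp)
    have h2 : h0 ≤ a := hmax h0 (hperm.mem_iff.mp (hσeq ▸ List.mem_cons_self))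
    omega
  rw [hσeq, List.tail_cons]
  -- the next histogram, named piecewise
  obtain ⟨c, hcdef⟩ : ∃ x, (cnt.get? a).getD 0 = x := ⟨_, rfl⟩
  have hcc : c = ((a :: t).count a : Int) := by
    rw [← hcdef, ← PySem.Dict.getD_eq_get?_getD]; exact hcount a
  have hcpos : 1 ≤ c := by
    rw [hcc]
    have : 0 < (a :: t).count a := List.count_pos_iff.mpr List.mem_cons_self
    omega
  obtain ⟨cnt1, h1⟩ : ∃ x, (if c == 1 then cnt.erase a else cnt.insert a (c - 1)) = x := ⟨_, rfl⟩
  obtain ⟨cnt2, h2⟩ : ∃ x, cnt1.insert hi (cnt1.getD hi 0 + 1) = x := ⟨_, rfl⟩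
  obtain ⟨cnt3, h3⟩ : ∃ x, cnt2.insert lo (cnt2.getD lo 0 + 1) = x := ⟨_, rfl⟩
  have hbn : pNext cnt = cnt3 := by
    rw [pNext]
    simp only [hL, hhi, hlo, hcdef]
    rw [h1, h2, h3]
  rw [hbn]
  -- counts of the new list, via the permutation
  have hscount : ∀ v : Int, (tt.count v : Int) + (if a = v then 1 else 0)
      = ((a :: t).count v : Int) + (if hi = v then 1 else 0) + (if lo = v then 1 else 0) := by
    intro v
    have e1 := hperm.count_eq v
    rw [hσeq, hh] at e1
    have hdec : (a :: t).count v = t.count v + (if a = v then 1 else 0) := by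
      simp [List.count_cons]
    simp only [List.count_cons, List.count_append, List.count_nil, beq_iff_eq] at e1
    split_ifs at e1 hdec ⊢ <;> omega
  -- getD of the new histogram, layer by layer
  have l1 : ∀ v : Int, cnt1.getD v 0 = if v = a then c - 1 else cnt.getD v 0 := by
    intro v
    rw [← h1]
    split_ifs with hc hv hv2
    · rw [PySem.Dict.getD_eq_get?_getD, hv, get?_erase_self]
      have : c = 1 := by simpa using hc
      simp [this]
    · rw [PySem.Dict.getD_eq_get?_getD, get?_erase_ne _ _ _ hv, ← PySem.Dict.getD_eq_get?_getD]
    · rw [PySem.Dict.getD_insert, if_pos hv2]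
    · rw [PySem.Dict.getD_insert, if_neg hv2]
  have l2 : ∀ v : Int, cnt2.getD v 0 = (if v = hi then 1 else 0) + cnt1.getD v 0 := by
    intro v
    rw [← h2, PySem.Dict.getD_insert]
    split_ifs with hv
    · rw [hv]; omega
    · omega
  have l3 : ∀ v : Int, cnt3.getD v 0 = (if v = lo then 1 else 0) + cnt2.getD v 0 := by
    intro v
    rw [← h3, PySem.Dict.getD_insert]
    split_ifs with hv
    · rw [hv]; omega
    · omega
  have hc3 : ∀ v : Int, cnt3.getD v 0 = (tt.count v : Int) := by
    intro v
    rw [l3 v, l2 v, l1 v]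
    have e := hscount v
    have hv := hcount v
    by_cases hva : v = a
    · subst hva
      rw [hcc] at *
      split_ifs at e hv ⊢ <;> omega
    · simp only [if_neg hva]
      split_ifs at e ⊢ <;> omega
  -- assemble the invariant
  refine ⟨?_, ?_, ?_, hc3, ?_, ?_⟩
  · have hlenσ : σ.length = (a :: t).length + 2 := by
      rw [← hσ, PySem.List.length_sorted]; simp
    rw [hσeq] at hlenσ
    simp only [List.length_cons] at hlenσ
    exact List.ne_nil_of_length_pos (by omega)
  · rw [hσeq] at hσpw
    exact hσpw.of_cons
  · intro y hy
    have hyσ : y ∈ σ := by rw [hσeq]; exact List.mem_cons_of_mem _ hy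
    rcases List.mem_append.mp (hperm.mem_iff.mp hyσ) with hy' | hy'
    · exact hpos y hy'
    · simp only [List.mem_cons, List.not_mem_nil, or_false] at hy'
      rcases hy' with rfl | rfl <;> omega
  · rw [← h3, ← h2]
    refine PySem.Dict.nodup_keys_insert _ _ _ (PySem.Dict.nodup_keys_insert _ _ _ ?_)
    rw [← h1]
    split_ifs
    · exact nodup_keys_erase _ _ hnodup
    · exact PySem.Dict.nodup_keys_insert _ _ _ hnodup
  · intro k
    have hmemtt : k ∈ tt ↔ (tt.count k : Int) ≠ 0 := by
      rw [Ne, Int.natCast_eq_zero, List.count_eq_zero, not_not]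
    rw [hmemtt, ← hc3 k, l3 k, l2 k, l1 k]
    have hkc : k ∈ cnt.keys ↔ ((a :: t).count k : Int) ≠ 0 := by
      rw [hkeys k, Ne, Int.natCast_eq_zero, List.count_eq_zero, not_not]
    have hcountk := hcount k
    rw [← h3, ← h2, PySem.Dict.mem_keys_insert, PySem.Dict.mem_keys_insert]
    have hcnn : 0 ≤ cnt.getD k 0 := by rw [hcountk]; positivity
    have hval : 0 ≤ (if k = a then c - 1 else cnt.getD k 0) := by split_ifs <;> omega
    by_cases e3 : k = lo
    · subst e3
      refine iff_of_true (Or.inl rfl) ?_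
      split_ifs at hval ⊢ <;> omega
    · by_cases e2 : k = hi
      · subst e2
        refine iff_of_true (Or.inr (Or.inl rfl)) ?_
        split_ifs at hval ⊢ <;> omega
      · simp only [e3, e2, false_or, if_false, zero_add]
        rw [← h1]
        by_cases hc : c = 1
        · have hcb : (c == 1) = true := by simp [hc]
          simp only [hcb, if_true, mem_keys_erase]
          by_cases e1 : k = a
          · subst e1
            refine iff_of_false ?_ ?_
            · rintro ⟨hka, _⟩; exact hka rfl
            · split_ifs <;> omega
          · simp only [if_neg e1]
            rw [hkc, hcountk]
            constructor
            · rintro ⟨_, hk0⟩; exact hk0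
            · intro hk0; exact ⟨e1, hk0⟩
        · have hcb : (c == 1) = false := by simp [hc]
          simp only [hcb, Bool.false_eq_true, if_false, PySem.Dict.mem_keys_insert]
          by_cases e1 : k = a
          · subst e1
            refine iff_of_true (Or.inl rfl) ?_
            split_ifs <;> omega
          · simp only [if_neg e1]
            rw [hkc, hcountk]
            constructor
            · rintro (h | h)
              · exact absurd h e1
              · exact h
            · intro h; exact Or.inr h

-- the base step: with one unit of fuel left both sides return the freshly split pair
theorem loopEq_one (s : List Int) (cnt : PySem.Dict Int Int) (N a : Int) (t : List Int)
    (hs : s = a :: t) (ha : 0 ≤ a)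
    (hL : maxKey cnt = a) :
    answerOf (whichLoop 1 s) = pLoop N 1 cnt := by
  subst hs
  have hx : (PySem.List.pyGet? (a :: t) 0).getD 0 = a := by
    simp [PySem.List.pyGet?, PySem.List.pyIdx?]
  have hW : whichLoop 1 (a :: t) = aNextList (a :: t) := rfl
  rw [hW, aNextList_eq a t ha]
  have hP : pLoop N 1 cnt = (hiOf a, loOf a) := by
    simp [pLoop, hL]
  rw [hP]
  obtain ⟨hlo0, hlohi, hhia, _, _⟩ := hiLo_facts a ha
  simp only [answerOf]
  rw [PySem.List.slice_from_neg_ofNat _ 2 (by omega)]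
  have hlen : ((a :: t) ++ [hiOf a, loOf a]).length - 2 = (a :: t).length := by simp
  rw [hlen, List.drop_left]
  rw [PySem.List.max?_id_cons, PySem.List.min?_id_cons]
  simp only [List.foldl, Option.getD_some]
  rw [max_eq_left (by omega), min_eq_right (by omega)]

theorem loopEq (m : Nat) :
    ∀ (s : List Int) (cnt : PySem.Dict Int Int) (N : Int),
      StInv s cnt → answerOf (whichLoop (m + 1) s) = pLoop N (m + 1) cnt := by
  induction m with
  | zero =>
    intro s cnt N hSt
    obtain ⟨hne, hpw, hpos, hcount, hnodup, hkeys⟩ := hSt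
    obtain ⟨a, t, rfl⟩ := List.exists_cons_of_ne_nil hne
    exact loopEq_one _ cnt N a t rfl (hpos a List.mem_cons_self)
      (maxKeys_eq cnt a t hkeys hpw)
  | succ m ih =>
    intro s cnt N hSt
    have hne := hSt.1
    obtain ⟨a, t, rfl⟩ := List.exists_cons_of_ne_nil hne
    have hL : maxKey cnt = a :=
      maxKeys_eq cnt a t hSt.2.2.2.2.2 hSt.2.1
    have hstep := step_inv a t cnt hSt hL
    rw [whichLoop_succ, pLoop_succ, PySem.List.slice_from_one]
    exact ih _ _ N hstep

-- ===================== layer 2: histogram (per person) = cohort loop =====================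

theorem maxKey_mem (d : PySem.Dict Int Int) (hD : DInv d) : maxKey d ∈ d.keys := by
  obtain ⟨hne, -, -, -, -⟩ := hD
  unfold maxKey
  cases hm : PySem.List.max? d.keys (fun v => v) with
  | none => exact absurd ((PySem.List.max?_eq_none_iff _ _).mp hm) hne
  | some m => simpa using PySem.List.max?_mem hm

theorem maxKey_isMax (d : PySem.Dict Int Int) (hD : DInv d) :
    ∀ k ∈ d.keys, k ≤ maxKey d := by
  intro k hk
  unfold maxKey
  cases hm : PySem.List.max? d.keys (fun v => v) with
  | none =>
    exact absurd (((PySem.List.max?_eq_none_iff _ _).mp hm) ▸ hk) (List.not_mem_nil)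
  | some m => simpa using PySem.List.max?_isMax hm k hk

theorem maxKey_nonneg (d : PySem.Dict Int Int) (hD : DInv d) : 0 ≤ maxKey d :=
  hD.2.2.2.2 _ (maxKey_mem d hD)

theorem maxKey_count_pos (d : PySem.Dict Int Int) (hD : DInv d) :
    1 ≤ d.getD (maxKey d) 0 := by
  have h1 := (hD.2.2.1 (maxKey d)).mp (maxKey_mem d hD)
  have h2 := hD.2.2.2.1 (maxKey d)
  omega

theorem sameMax (d1 d2 : PySem.Dict Int Int) (h1 : DInv d1) (h2 : DInv d2)
    (hc : ∀ v : Int, d1.getD v 0 = d2.getD v 0) : maxKey d1 = maxKey d2 := by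
  have hmem : ∀ v : Int, v ∈ d1.keys ↔ v ∈ d2.keys := by
    intro v; rw [h1.2.2.1, h2.2.2.1, hc]
  have a1 : maxKey d1 ≤ maxKey d2 :=
    maxKey_isMax d2 h2 _ ((hmem _).mp (maxKey_mem d1 h1))
  have a2 : maxKey d2 ≤ maxKey d1 :=
    maxKey_isMax d1 h1 _ ((hmem _).mpr (maxKey_mem d2 h2))
  omega

-- counts after one per-person step
theorem pNext_counts (d : PySem.Dict Int Int) (hD : DInv d) (v : Int) :
    (pNext d).getD v 0 =
      (if v = maxKey d then d.getD (maxKey d) 0 - 1 else d.getD v 0)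
      + (if v = hiOf (maxKey d) then 1 else 0) + (if v = loOf (maxKey d) then 1 else 0) := by
  obtain ⟨L, hLdef⟩ : ∃ x, maxKey d = x := ⟨_, rfl⟩
  have hc1 : 1 ≤ d.getD L 0 := hLdef ▸ maxKey_count_pos d hD
  have hget : (d.get? L).getD 0 = d.getD L 0 := (PySem.Dict.getD_eq_get?_getD d L 0).symm
  obtain ⟨c, hcdef⟩ : ∃ x, d.getD L 0 = x := ⟨_, rfl⟩
  obtain ⟨cnt1, h1⟩ : ∃ x, (if c == 1 then d.erase L else d.insert L (c - 1)) = x := ⟨_, rfl⟩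
  obtain ⟨cnt2, h2⟩ : ∃ x, cnt1.insert (hiOf L) (cnt1.getD (hiOf L) 0 + 1) = x := ⟨_, rfl⟩
  obtain ⟨cnt3, h3⟩ : ∃ x, cnt2.insert (loOf L) (cnt2.getD (loOf L) 0 + 1) = x := ⟨_, rfl⟩
  have hbn : pNext d = cnt3 := by
    rw [pNext]
    simp only [hLdef, hget, hcdef]
    rw [h1, h2, h3]
  have l1 : ∀ w : Int, cnt1.getD w 0 = if w = L then c - 1 else d.getD w 0 := by
    intro w
    rw [← h1]
    split_ifs with hc hw hw2
    · rw [getD_erase, if_pos hw]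
      have : c = 1 := by simpa using hc
      omega
    · rw [getD_erase, if_neg hw]
    · rw [PySem.Dict.getD_insert, if_pos hw2]
    · rw [PySem.Dict.getD_insert, if_neg hw2]
  have l2 : ∀ w : Int, cnt2.getD w 0 = (if w = hiOf L then 1 else 0) + cnt1.getD w 0 := by
    intro w
    rw [← h2, PySem.Dict.getD_insert]
    split_ifs with hv
    · rw [hv]; omega
    · omega
  have l3 : ∀ w : Int, cnt3.getD w 0 = (if w = loOf L then 1 else 0) + cnt2.getD w 0 := by
    intro w
    rw [← h3, PySem.Dict.getD_insert]
    split_ifs with hv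
    · rw [hv]; omega
    · omega
  rw [hbn, hLdef, l3 v, l2 v, l1 v, hcdef]
  split_ifs <;> omega

theorem mem_keys_pNext (d : PySem.Dict Int Int) (hD : DInv d) (v : Int) :
    v ∈ (pNext d).keys ↔ v = loOf (maxKey d) ∨ v = hiOf (maxKey d) ∨
      (v = maxKey d ∧ d.getD (maxKey d) 0 ≠ 1) ∨ (v ≠ maxKey d ∧ v ∈ d.keys) := by
  obtain ⟨L, hLdef⟩ : ∃ x, maxKey d = x := ⟨_, rfl⟩
  have hget : (d.get? L).getD 0 = d.getD L 0 := (PySem.Dict.getD_eq_get?_getD d L 0).symm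
  have hLmem : L ∈ d.keys := hLdef ▸ maxKey_mem d hD
  rw [pNext]
  simp only [hLdef, hget]
  rw [PySem.Dict.mem_keys_insert, PySem.Dict.mem_keys_insert]
  by_cases hc : d.getD L 0 = 1
  · have hcb : (d.getD L 0 == 1) = true := by simp [hc]
    rw [hcb, if_pos rfl, mem_keys_erase]
    constructor
    · rintro (h | h | ⟨hne, hmem⟩)
      · exact Or.inl h
      · exact Or.inr (Or.inl h)
      · exact Or.inr (Or.inr (Or.inr ⟨hne, hmem⟩))
    · rintro (h | h | ⟨hvL, hc1⟩ | ⟨hne, hmem⟩)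
      · exact Or.inl h
      · exact Or.inr (Or.inl h)
      · exact absurd hc hc1
      · exact Or.inr (Or.inr ⟨hne, hmem⟩)
  · have hcb : (d.getD L 0 == 1) = false := by simp [hc]
    rw [hcb]
    simp only [Bool.false_eq_true, if_false, PySem.Dict.mem_keys_insert]
    constructor
    · rintro (h | h | h | hmem)
      · exact Or.inl h
      · exact Or.inr (Or.inl h)
      · exact Or.inr (Or.inr (Or.inl ⟨h, hc⟩))
      · by_cases hvL : v = L
        · exact Or.inr (Or.inr (Or.inl ⟨hvL, hc⟩))
        · exact Or.inr (Or.inr (Or.inr ⟨hvL, hmem⟩))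
    · rintro (h | h | ⟨hvL, -⟩ | ⟨-, hmem⟩)
      · exact Or.inl h
      · exact Or.inr (Or.inl h)
      · exact Or.inr (Or.inr (Or.inl hvL))
      · exact Or.inr (Or.inr (Or.inr hmem))

theorem pNext_DInv (d : PySem.Dict Int Int) (hD : DInv d) : DInv (pNext d) := by
  have hL0 : 0 ≤ maxKey d := maxKey_nonneg d hD
  have hc1 : 1 ≤ d.getD (maxKey d) 0 := maxKey_count_pos d hD
  obtain ⟨hlo0, hlohi, hhiL, hhilt, hzero⟩ := hiLo_facts (maxKey d) hL0
  have hmemlo : loOf (maxKey d) ∈ (pNext d).keys :=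
    (mem_keys_pNext d hD _).mpr (Or.inl rfl)
  refine ⟨List.ne_nil_of_mem hmemlo, ?_, ?_, ?_, ?_⟩
  · rw [pNext]
    refine PySem.Dict.nodup_keys_insert _ _ _ (PySem.Dict.nodup_keys_insert _ _ _ ?_)
    split_ifs
    · exact nodup_keys_erase _ _ hD.2.1
    · exact PySem.Dict.nodup_keys_insert _ _ _ hD.2.1
  · intro v
    rw [mem_keys_pNext d hD v, pNext_counts d hD v]
    have hdv := hD.2.2.2.1 v
    have hmemv := hD.2.2.1 v
    by_cases e3 : v = loOf (maxKey d)
    · refine iff_of_true (Or.inl e3) ?_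
      split_ifs <;> omega
    · by_cases e2 : v = hiOf (maxKey d)
      · refine iff_of_true (Or.inr (Or.inl e2)) ?_
        split_ifs <;> omega
      · simp only [e3, e2, if_false, add_zero, false_or]
        by_cases e1 : v = maxKey d
        · rw [if_pos e1]
          constructor
          · rintro (⟨-, hne⟩ | ⟨hne, -⟩)
            · omega
            · exact absurd e1 hne
          · intro h; exact Or.inl ⟨e1, by omega⟩
        · simp only [if_neg e1]
          constructor
          · rintro (⟨h, -⟩ | ⟨-, hmem⟩)
            · exact absurd h e1
            · exact (hmemv).mp hmem
          · intro h; exact Or.inr ⟨e1, (hmemv).mpr h⟩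
  · intro v
    rw [pNext_counts d hD v]
    have := hD.2.2.2.1 v
    split_ifs <;> omega
  · intro v hv
    rcases (mem_keys_pNext d hD v).mp hv with h | h | ⟨h, -⟩ | ⟨-, h⟩
    · omega
    · omega
    · omega
    · exact hD.2.2.2.2 v h

theorem maxKey_pNext (d : PySem.Dict Int Int) (hD : DInv d)
    (h : (pNext d).getD (maxKey d) 0 ≠ 0) : maxKey (pNext d) = maxKey d := by
  have hL0 : 0 ≤ maxKey d := maxKey_nonneg d hD
  obtain ⟨hlo0, hlohi, hhiL, -, -⟩ := hiLo_facts (maxKey d) hL0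
  have hD' := pNext_DInv d hD
  refine maxKey_eq_of _ _ ((hD'.2.2.1 _).mpr h) ?_
  intro k hk
  rcases (mem_keys_pNext d hD k).mp hk with h | h | ⟨h, -⟩ | ⟨-, h⟩
  · omega
  · omega
  · omega
  · exact maxKey_isMax d hD k h

-- per-person loop answers (hiOf L, loOf L) while at least fuel copies of the max remain
theorem lemA (k : Nat) : ∀ (N : Int) (d : PySem.Dict Int Int), DInv d →
    ((k : Int) + 1) ≤ d.getD (maxKey d) 0 →
    pLoop N (k + 1) d = (hiOf (maxKey d), loOf (maxKey d)) := by
  induction k with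
  | zero => intro N d _ _; simp [pLoop]
  | succ k ih =>
    intro N d hD hcnt
    have hD' := pNext_DInv d hD
    have hL0 : 0 ≤ maxKey d := maxKey_nonneg d hD
    have hge : d.getD (maxKey d) 0 - 1 ≤ (pNext d).getD (maxKey d) 0 := by
      rw [pNext_counts d hD (maxKey d), if_pos rfl]; split_ifs <;> omega
    have hne : (pNext d).getD (maxKey d) 0 ≠ 0 := by
      push_cast at hcnt; omega
    have hM : maxKey (pNext d) = maxKey d := maxKey_pNext d hD hne
    rw [pLoop_succ, ih N (pNext d) hD' (by rw [hM]; push_cast at hcnt ⊢; omega), hM]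

-- all lengths zero: the per-person loop returns (0,0) at any positive fuel
theorem pLoopZero (m : Nat) : ∀ (N : Int) (d : PySem.Dict Int Int), DInv d →
    maxKey d = 0 → pLoop N (m + 1) d = (0, 0) := by
  induction m with
  | zero =>
    intro N d hD h0
    obtain ⟨-, -, -, -, hz⟩ := hiLo_facts (maxKey d) (by omega)
    obtain ⟨hhi, hlo⟩ := hz h0
    simp [pLoop, hhi, hlo]
  | succ m ih =>
    intro N d hD h0
    have hD' := pNext_DInv d hD
    obtain ⟨-, -, -, -, hz⟩ := hiLo_facts (maxKey d) (by omega)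
    obtain ⟨hhi, hlo⟩ := hz h0
    have hc1 : 1 ≤ d.getD (maxKey d) 0 := maxKey_count_pos d hD
    have hne : (pNext d).getD (maxKey d) 0 ≠ 0 := by
      rw [pNext_counts d hD (maxKey d), if_pos rfl]
      split_ifs <;> omega
    have hM : maxKey (pNext d) = 0 := h0 ▸ maxKey_pNext d hD hne
    rw [pLoop_succ, ih N (pNext d) hD' hM]

-- c+1 per-person steps peel the used-up copies of the maximum off the histogram
theorem lemB (c : Nat) : ∀ (N : Int) (d : PySem.Dict Int Int) (m : Nat), DInv d →
    1 ≤ maxKey d → ((c : Int) + 1) ≤ d.getD (maxKey d) 0 → c + 1 < m →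
    ∃ d', pLoop N m d = pLoop N (m - (c + 1)) d' ∧ DInv d' ∧
      (∀ v : Int, d'.getD v 0 =
        (if v = maxKey d then d.getD (maxKey d) 0 - ((c : Int) + 1) else d.getD v 0)
        + (if v = hiOf (maxKey d) then (c : Int) + 1 else 0)
        + (if v = loOf (maxKey d) then (c : Int) + 1 else 0)) := by
  induction c with
  | zero =>
    intro N d m hD hL1 hcnt hm
    obtain ⟨m', rfl⟩ : ∃ x, m = x + 2 := ⟨m - 2, by omega⟩
    refine ⟨pNext d, ?_, pNext_DInv d hD, ?_⟩
    · have he : m' + 2 - (0 + 1) = m' + 1 := by omega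
      rw [he, pLoop_succ]
    · intro v
      have := pNext_counts d hD v
      rw [this]
      split_ifs <;> omega
  | succ c ih =>
    intro N d m hD hL1 hcnt hm
    obtain ⟨m', rfl⟩ : ∃ x, m = x + 2 := ⟨m - 2, by omega⟩
    have hD' := pNext_DInv d hD
    have hL0 : 0 ≤ maxKey d := by omega
    obtain ⟨hlo0, hlohi, hhiL, hhilt, -⟩ := hiLo_facts (maxKey d) hL0
    have hlt : hiOf (maxKey d) < maxKey d := hhilt hL1
    have hpcL : (pNext d).getD (maxKey d) 0 = d.getD (maxKey d) 0 - 1 := by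
      rw [pNext_counts d hD (maxKey d), if_pos rfl,
        if_neg (by omega), if_neg (by omega)]
      omega
    have hne : (pNext d).getD (maxKey d) 0 ≠ 0 := by
      rw [hpcL]; push_cast at hcnt; omega
    have hM : maxKey (pNext d) = maxKey d := maxKey_pNext d hD hne
    obtain ⟨d', hstep, hDd', hcount⟩ :=
      ih N (pNext d) (m' + 1) hD' (by omega) (by rw [hM, hpcL]; push_cast at hcnt ⊢; omega)
        (by omega)
    refine ⟨d', ?_, hDd', ?_⟩
    · have he : m' + 2 - (c + 1 + 1) = m' + 1 - (c + 1) := by omega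
      rw [he, pLoop_succ, hstep]
    · intro v
      have f1 := hcount v
      rw [hM] at f1
      have f2 := pNext_counts d hD v
      rw [f1, hpcL, f2]
      split_ifs <;> omega

-- counts and invariant after one cohort step
theorem bstep_counts (d : PySem.Dict Int Int) (hD : DInv d) (v : Int) :
    ((((d.erase (maxKey d)).insert (hiOf (maxKey d))
        ((d.erase (maxKey d)).getD (hiOf (maxKey d)) 0 + d.getD (maxKey d) 0)).insert
        (loOf (maxKey d))
        (((d.erase (maxKey d)).insert (hiOf (maxKey d))
          ((d.erase (maxKey d)).getD (hiOf (maxKey d)) 0 + d.getD (maxKey d) 0)).getD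
          (loOf (maxKey d)) 0 + d.getD (maxKey d) 0)).getD v 0)
      = (if v = maxKey d then 0 else d.getD v 0)
        + (if v = hiOf (maxKey d) then d.getD (maxKey d) 0 else 0)
        + (if v = loOf (maxKey d) then d.getD (maxKey d) 0 else 0) := by
  obtain ⟨A1, h1⟩ : ∃ x, d.erase (maxKey d) = x := ⟨_, rfl⟩
  obtain ⟨A2, h2⟩ : ∃ x,
      A1.insert (hiOf (maxKey d)) (A1.getD (hiOf (maxKey d)) 0 + d.getD (maxKey d) 0) = x :=
    ⟨_, rfl⟩
  have l0 : ∀ w : Int, A1.getD w 0 = if w = maxKey d then 0 else d.getD w 0 := by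
    intro w; rw [← h1, getD_erase]
  have l1 : ∀ w : Int, A2.getD w 0 =
      (if w = hiOf (maxKey d) then d.getD (maxKey d) 0 else 0) + A1.getD w 0 := by
    intro w
    rw [← h2, PySem.Dict.getD_insert]
    split_ifs with hv
    · rw [hv]; omega
    · omega
  rw [h1, h2, PySem.Dict.getD_insert]
  by_cases hv : v = loOf (maxKey d)
  · rw [if_pos hv, hv, l1, l0]
    split_ifs <;> omega
  · rw [if_neg hv, l1, l0]
    split_ifs <;> omega

theorem bstep_DInv (d : PySem.Dict Int Int) (hD : DInv d) :
    DInv ((((d.erase (maxKey d)).insert (hiOf (maxKey d))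
        ((d.erase (maxKey d)).getD (hiOf (maxKey d)) 0 + d.getD (maxKey d) 0)).insert
        (loOf (maxKey d))
        (((d.erase (maxKey d)).insert (hiOf (maxKey d))
          ((d.erase (maxKey d)).getD (hiOf (maxKey d)) 0 + d.getD (maxKey d) 0)).getD
          (loOf (maxKey d)) 0 + d.getD (maxKey d) 0))) := by
  have hL0 : 0 ≤ maxKey d := maxKey_nonneg d hD
  have hc1 : 1 ≤ d.getD (maxKey d) 0 := maxKey_count_pos d hD
  obtain ⟨hlo0, hlohi, hhiL, -, -⟩ := hiLo_facts (maxKey d) hL0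
  have hkeys : ∀ v : Int,
      v ∈ ((((d.erase (maxKey d)).insert (hiOf (maxKey d))
        ((d.erase (maxKey d)).getD (hiOf (maxKey d)) 0 + d.getD (maxKey d) 0)).insert
        (loOf (maxKey d))
        (((d.erase (maxKey d)).insert (hiOf (maxKey d))
          ((d.erase (maxKey d)).getD (hiOf (maxKey d)) 0 + d.getD (maxKey d) 0)).getD
          (loOf (maxKey d)) 0 + d.getD (maxKey d) 0))).keys
      ↔ v = loOf (maxKey d) ∨ v = hiOf (maxKey d) ∨ (v ≠ maxKey d ∧ v ∈ d.keys) := by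
    intro v
    rw [PySem.Dict.mem_keys_insert, PySem.Dict.mem_keys_insert, mem_keys_erase]
  refine ⟨List.ne_nil_of_mem ((hkeys _).mpr (Or.inl rfl)), ?_, ?_, ?_, ?_⟩
  · exact PySem.Dict.nodup_keys_insert _ _ _
      (PySem.Dict.nodup_keys_insert _ _ _ (nodup_keys_erase _ _ hD.2.1))
  · intro v
    rw [hkeys v, bstep_counts d hD v]
    have hdv := hD.2.2.2.1 v
    have hmemv := hD.2.2.1 v
    by_cases e3 : v = loOf (maxKey d)
    · refine iff_of_true (Or.inl e3) ?_
      split_ifs <;> omega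
    · by_cases e2 : v = hiOf (maxKey d)
      · refine iff_of_true (Or.inr (Or.inl e2)) ?_
        split_ifs <;> omega
      · simp only [e3, e2, if_false, add_zero, false_or]
        by_cases e1 : v = maxKey d
        · refine iff_of_false ?_ ?_
          · rintro ⟨h, -⟩; exact h e1
          · rw [if_pos e1]; omega
        · rw [if_neg e1]
          constructor
          · rintro ⟨-, hmem⟩; exact (hmemv).mp hmem
          · intro h; exact ⟨e1, (hmemv).mpr h⟩
  · intro v
    rw [bstep_counts d hD v]
    have := hD.2.2.2.1 v
    split_ifs <;> omega
  · intro v hv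
    rcases (hkeys v).mp hv with h | h | ⟨-, h⟩
    · omega
    · omega
    · exact hD.2.2.2.2 v h

-- all lengths zero: the cohort loop returns (0,0)
theorem bLoopZero (f : Nat) : ∀ (N K : Int) (d : PySem.Dict Int Int), DInv d →
    maxKey d = 0 → 1 ≤ K → K ≤ (f : Int) → bLoop N f K d = (0, 0) := by
  induction f with
  | zero => intro N K d _ _ h1 h2; omega
  | succ f ih =>
    intro N K d hD h0 hK1 hKf
    have hc1 : 1 ≤ d.getD (maxKey d) 0 := maxKey_count_pos d hD
    obtain ⟨-, -, -, -, hz⟩ := hiLo_facts (maxKey d) (by omega)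
    obtain ⟨hhi, hlo⟩ := hz h0
    rw [bLoop]
    have hKne : ¬ (K = 0) := by omega
    simp only [beq_iff_eq, hKne, if_false]
    rw [show ((PySem.List.max? d.keys fun v => v).getD 0) = maxKey d from rfl]
    rw [show ((d.get? (maxKey d)).getD 0) = d.getD (maxKey d) 0 from
      (PySem.Dict.getD_eq_get?_getD d (maxKey d) 0).symm]
    rw [show (if maxKey d > 0 then maxKey d - 1 else maxKey d) = tmpOf (maxKey d) from rfl]
    rw [show (tmpOf (maxKey d) - PySem.Int.floordiv (tmpOf (maxKey d)) 2) = hiOf (maxKey d)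
      from rfl]
    rw [show (PySem.Int.floordiv (tmpOf (maxKey d)) 2) = loOf (maxKey d) from rfl]
    by_cases hKc : K ≤ d.getD (maxKey d) 0
    · rw [if_pos hKc, hhi, hlo]
    · rw [if_neg hKc]
      have hD' := bstep_DInv d hD
      have hM' : maxKey ((((d.erase (maxKey d)).insert (hiOf (maxKey d))
          ((d.erase (maxKey d)).getD (hiOf (maxKey d)) 0 + d.getD (maxKey d) 0)).insert
          (loOf (maxKey d))
          (((d.erase (maxKey d)).insert (hiOf (maxKey d))
            ((d.erase (maxKey d)).getD (hiOf (maxKey d)) 0 + d.getD (maxKey d) 0)).getD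
            (loOf (maxKey d)) 0 + d.getD (maxKey d) 0))) = 0 := by
        apply maxKey_eq_of
        · apply (hD'.2.2.1 _).mpr
          rw [bstep_counts d hD 0]
          rw [h0] at hc1 hhi hlo ⊢
          split_ifs <;> omega
        · intro j hj
          have hge := hD'.2.2.2.2 j hj
          have hne := (hD'.2.2.1 j).mp hj
          rw [bstep_counts d hD j] at hne
          have hjd : j ∈ d.keys → j ≤ 0 := fun h => h0 ▸ maxKey_isMax d hD j h
          by_cases hjk : j ∈ d.keys
          · exact hjd hjk
          · have : d.getD j 0 = 0 := by
              by_contra hcon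
              exact hjk ((hD.2.2.1 j).mpr hcon)
            rw [h0] at hhi hlo
            split_ifs at hne <;> omega
      exact ih N (K - d.getD (maxKey d) 0) _ hD' hM' (by omega) (by omega)

-- main layer-2 theorem: per-person histogram loop = cohort loop
theorem pLoop_eq_bLoop (f : Nat) : ∀ (N K : Int) (d1 d2 : PySem.Dict Int Int),
    DInv d1 → DInv d2 → (∀ v : Int, d1.getD v 0 = d2.getD v 0) →
    1 ≤ K → K ≤ (f : Int) → pLoop N K.toNat d1 = bLoop N f K d2 := by
  induction f with
  | zero => intro N K d1 d2 _ _ _ h1 h2; omega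
  | succ f ih =>
    intro N K d1 d2 hD1 hD2 hcnts hK1 hKf
    have hM : maxKey d1 = maxKey d2 := sameMax d1 d2 hD1 hD2 hcnts
    have hL0 : 0 ≤ maxKey d2 := maxKey_nonneg d2 hD2
    have hc1 : 1 ≤ d2.getD (maxKey d2) 0 := maxKey_count_pos d2 hD2
    obtain ⟨k, hk⟩ : ∃ x, K.toNat = x + 1 := ⟨K.toNat - 1, by omega⟩
    have hkK : ((k : Int)) + 1 = K := by omega
    by_cases hL1 : maxKey d2 = 0
    · rw [hk, pLoopZero k N d1 hD1 (hM.trans hL1),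
        bLoopZero (f + 1) N K d2 hD2 hL1 hK1 hKf]
    · have hL1' : 1 ≤ maxKey d2 := by omega
      obtain ⟨-, -, -, hhilt, -⟩ := hiLo_facts (maxKey d2) hL0
      show pLoop N K.toNat d1 = bLoop N (f + 1) K d2
      rw [bLoop]
      have hKne : ¬ (K = 0) := by omega
      simp only [beq_iff_eq, hKne, if_false]
      rw [show ((PySem.List.max? d2.keys fun v => v).getD 0) = maxKey d2 from rfl]
      rw [show ((d2.get? (maxKey d2)).getD 0) = d2.getD (maxKey d2) 0 from
        (PySem.Dict.getD_eq_get?_getD d2 (maxKey d2) 0).symm]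
      rw [show (if maxKey d2 > 0 then maxKey d2 - 1 else maxKey d2) = tmpOf (maxKey d2) from rfl]
      rw [show (tmpOf (maxKey d2) - PySem.Int.floordiv (tmpOf (maxKey d2)) 2) = hiOf (maxKey d2)
        from rfl]
      rw [show (PySem.Int.floordiv (tmpOf (maxKey d2)) 2) = loOf (maxKey d2) from rfl]
      by_cases hKc : K ≤ d2.getD (maxKey d2) 0
      · rw [if_pos hKc, hk, lemA k N d1 hD1 (by rw [hM, hcnts (maxKey d2)]; omega), hM]
      · rw [if_neg hKc]
        obtain ⟨c', hc'⟩ : ∃ x : Nat, d2.getD (maxKey d2) 0 = (x : Int) + 1 :=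
          ⟨(d2.getD (maxKey d2) 0 - 1).toNat, by omega⟩
        obtain ⟨d1', hstep, hDd1', hcount⟩ :=
          lemB c' N d1 K.toNat hD1 (by rw [hM]; omega)
            (by rw [hM, hcnts (maxKey d2)]; omega) (by omega)
        have harith : K.toNat - (c' + 1) = (K - d2.getD (maxKey d2) 0).toNat := by omega
        rw [hstep, harith]
        apply ih N (K - d2.getD (maxKey d2) 0) d1'
          _ hDd1' (bstep_DInv d2 hD2) ?_ (by omega) (by omega)
        intro v
        rw [hcount v, bstep_counts d2 hD2 v, hM, hcnts v, hcnts (maxKey d2)]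
        split_ifs <;> omega

-- ===== VERDICT (by name: the statement is the Claim_ definition above) =====
theorem which_spec : Claim_equal_which := by
  intro N K _hDom hPre
  unfold Spec_which
  obtain ⟨hN, hK⟩ := hPre
  obtain ⟨n, rfl⟩ : ∃ n : Nat, K = (n : Int) := ⟨K.toNat, (Int.toNat_of_nonneg hK).symm⟩
  cases n with
  | zero =>
    show which N 0 = which_alt N 0
    have hB : which_alt N 0 = (N, N) := rfl
    rw [hB]
    unfold which
    norm_num [whichLoop]
    rw [PySem.List.slice_from_neg_ofNat _ 2 (by omega)]
    simp [PySem.List.max?, PySem.List.min?]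
  | succ m =>
    have hInit : StInv [N] (PySem.Dict.empty.insert N 1) := by
      refine ⟨by simp, by simp, ?_, ?_, ?_, ?_⟩
      · intro y hy; simp at hy; omega
      · intro v
        rw [PySem.Dict.getD_insert]
        split_ifs with h
        · simp [h, List.count_cons]
        · simp [List.count_cons, Ne.symm h, PySem.Dict.getD_empty]
      · exact PySem.Dict.nodup_keys_insert _ _ _ PySem.Dict.nodup_keys_empty
      · intro k
        rw [PySem.Dict.mem_keys_insert]
        simp [PySem.Dict.keys_empty]
    have hDInit : DInv (PySem.Dict.empty.insert N 1) := by
      refine ⟨?_, PySem.Dict.nodup_keys_insert _ _ _ PySem.Dict.nodup_keys_empty, ?_, ?_, ?_⟩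
      · show ([N] : List Int) ≠ []
        simp
      · intro v
        show v ∈ [N] ↔ (PySem.Dict.empty.insert N 1).getD v 0 ≠ 0
        rw [PySem.Dict.getD_insert]
        split_ifs with h
        · simp [h]
        · simp [PySem.Dict.getD_empty, h]
      · intro v
        rw [PySem.Dict.getD_insert]
        split_ifs <;> simp [PySem.Dict.getD_empty]
      · intro v hv
        have hv' : v ∈ [N] := hv
        simp at hv'
        omega
    have htn : ((m : Int) + 1).toNat = m + 1 := by omega
    have h1 : which N ((m : Int) + 1) = pLoop N (m + 1) (PySem.Dict.empty.insert N 1) := by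
      have := loopEq m [N] (PySem.Dict.empty.insert N 1) N hInit
      show answerOf (whichLoop ((m : Int) + 1).toNat [N]) = _
      rw [htn]; exact this
    have h2 : pLoop N ((m : Int) + 1).toNat (PySem.Dict.empty.insert N 1)
        = bLoop N ((m : Int) + 1).toNat ((m : Int) + 1) (PySem.Dict.empty.insert N 1) := by
      apply pLoop_eq_bLoop _ _ _ _ _ hDInit hDInit (fun v => rfl) (by omega)
      rw [htn]; push_cast; omega
    show which N ((m : Int) + 1) = which_alt N ((m : Int) + 1)
    rw [h1]
    unfold which_alt
    rw [← h2, htn]
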